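-- pv_equiv track=rewrite | github.com/ebra2022-sudo/Email-spam-Detection-System | model_performance.py | get_true_positives
-- ===== SOURCE A (Python) =====
-- def get_true_positives(Y_true, Y_pred) :
--     """
--     Calculate the number of true positive instances in binary classification.
--
--     Parameters:
--     - Y_true (list): List of true labels (0 or 1) for each instance.
--     - Y_pred (list): List of predicted labels (0 or 1) for each instance.
--
--     Returns:
--     - int: Number of true positives, where true label and predicted label are both 1.
--     """
--     # Both Y_true and Y_pred must match in length.
--     if len(Y_true) != len(Y_pred) :
--         return "Number of true labels and predict labels must match!"
--     n = len(Y_true)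
--     true_positives = 0
--     # Iterate over the number of elements in the list
--     for i in range(n) :
--         # Get the true label for the considered email
--         true_label_i = Y_true[i]
--         # Get the predicted (model output) for the considered email
--         predicted_label_i = Y_pred[i]
--         # Increase the counter by 1 only if true_label_i = 1 and predicted_label_i = 1 (true positives)
--         if true_label_i == 1 and predicted_label_i == 1 :
--             true_positives += 1
--     return true_positives
-- ===== SOURCE B (Python) =====
-- def get_true_positives(Y_true, Y_pred):
--     """True positives via index sets: intersect the 1-indices of truth and prediction."""
--     if len(Y_true) != len(Y_pred):
--         return "Number of true labels and predict labels must match!"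
--     n = len(Y_true)
--     pos_true = {i for i in range(n) if Y_true[i] == 1}
--     pos_pred = {i for i in range(n) if Y_pred[i] == 1}
--     return len(pos_true & pos_pred)
-- ===== Notes on version B (the rewrite author's own statement) =====
-- stated objective: alternative
-- what changed: Replaces the running counter with a conjunction branch by building the two sets of indices where each list equals 1 and returning the size of their intersection.
import Mathlib
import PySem

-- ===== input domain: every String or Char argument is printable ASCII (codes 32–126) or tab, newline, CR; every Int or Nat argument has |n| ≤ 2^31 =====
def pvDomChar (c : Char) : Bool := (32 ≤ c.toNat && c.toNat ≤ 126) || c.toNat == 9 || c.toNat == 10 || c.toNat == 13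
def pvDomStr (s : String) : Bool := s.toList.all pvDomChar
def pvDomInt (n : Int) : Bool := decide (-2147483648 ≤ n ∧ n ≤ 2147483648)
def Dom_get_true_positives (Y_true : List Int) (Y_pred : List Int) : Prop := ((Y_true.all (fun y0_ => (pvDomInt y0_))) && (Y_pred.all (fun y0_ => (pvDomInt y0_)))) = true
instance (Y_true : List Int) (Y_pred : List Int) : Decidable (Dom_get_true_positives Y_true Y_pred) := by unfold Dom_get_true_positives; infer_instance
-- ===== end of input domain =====

-- B computes true positives as the size of the intersection of the two sets of 1-indices (alternative decomposition; return-value equivalence).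


-- ===== PORT A =====
-- On mismatched lengths Python A returns a string, not an int; that case is outside Pre_ and the port returns 0 there.
def get_true_positives (Y_true : List Int) (Y_pred : List Int) : Int :=
  if Y_true.length ≠ Y_pred.length then 0
  else
    (PySem.List.pyRange 0 (Y_true.length : Int) 1).foldl
      (fun true_positives i =>
        if PySem.List.pyGetD Y_true i 0 == 1 && PySem.List.pyGetD Y_pred i 0 == 1
        then true_positives + 1 else true_positives) 0

-- ===== PORT B =====
def get_true_positives_alt (Y_true : List Int) (Y_pred : List Int) : Int :=
  if Y_true.length ≠ Y_pred.length then 0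
  else
    let n : Int := (Y_true.length : Int)
    let pos_true : PySem.Set Int :=
      PySem.Set.ofList ((PySem.List.pyRange 0 n 1).filter (fun i => PySem.List.pyGetD Y_true i 0 == 1))
    let pos_pred : PySem.Set Int :=
      PySem.Set.ofList ((PySem.List.pyRange 0 n 1).filter (fun i => PySem.List.pyGetD Y_pred i 0 == 1))
    ((PySem.Set.inter pos_true pos_pred).length : Int)

-- ===== PRECONDITION & SPEC =====
-- Pre_ excludes mismatched lengths, where A returns an error STRING, not a value of the declared int type.
def Pre_get_true_positives (Y_true : List Int) (Y_pred : List Int) : Prop :=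
  Y_true.length = Y_pred.length
instance (Y_true : List Int) (Y_pred : List Int) : Decidable (Pre_get_true_positives Y_true Y_pred) := by unfold Pre_get_true_positives; infer_instance

def pvWitness_get_true_positives : List Int × List Int := ([1, 0, 1, 2], [1, 1, 1, 1])

def Spec_get_true_positives (Y_true : List Int) (Y_pred : List Int) (out : Int) : Prop := out = get_true_positives_alt Y_true Y_pred
instance (Y_true : List Int) (Y_pred : List Int) (out : Int) : Decidable (Spec_get_true_positives Y_true Y_pred out) := by unfold Spec_get_true_positives; infer_instance

-- ===== CLAIM (what is proved, stated in full; the proofs are below) =====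
def Claim_equal_get_true_positives : Prop := ∀ (Y_true : List Int) (Y_pred : List Int), Dom_get_true_positives Y_true Y_pred → Pre_get_true_positives Y_true Y_pred → Spec_get_true_positives Y_true Y_pred (get_true_positives Y_true Y_pred)

-- ===== LEMMAS AND PROOFS =====

-- B's intersection of the two 1-index sets is the filter of the range by the conjunction of the two tests.
theorem inter_ofList_filter_eq (Y_true Y_pred : List Int) (n : Int) :
    PySem.Set.inter
      (PySem.Set.ofList ((PySem.List.pyRange 0 n 1).filter (fun i => PySem.List.pyGetD Y_true i 0 == 1)))
      (PySem.Set.ofList ((PySem.List.pyRange 0 n 1).filter (fun i => PySem.List.pyGetD Y_pred i 0 == 1)))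
    = (PySem.List.pyRange 0 n 1).filter
        (fun i => PySem.List.pyGetD Y_true i 0 == 1 && PySem.List.pyGetD Y_pred i 0 == 1) := by
  have h1 : PySem.Set.ofList ((PySem.List.pyRange 0 n 1).filter (fun i => PySem.List.pyGetD Y_true i 0 == 1))
      = (PySem.List.pyRange 0 n 1).filter (fun i => PySem.List.pyGetD Y_true i 0 == 1) :=
    PySem.Set.ofList_eq_self_of_nodup _ ((PySem.List.nodup_pyRange_one 0 n).filter _)
  have h2 : PySem.Set.ofList ((PySem.List.pyRange 0 n 1).filter (fun i => PySem.List.pyGetD Y_pred i 0 == 1))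
      = (PySem.List.pyRange 0 n 1).filter (fun i => PySem.List.pyGetD Y_pred i 0 == 1) :=
    PySem.Set.ofList_eq_self_of_nodup _ ((PySem.List.nodup_pyRange_one 0 n).filter _)
  rw [h1, h2]
  unfold PySem.Set.inter
  rw [List.filter_filter]
  apply List.filter_congr
  intro i hi
  have hmem := hi
  by_cases ht : PySem.List.pyGetD Y_true i 0 == 1 <;>
  by_cases hp : PySem.List.pyGetD Y_pred i 0 == 1 <;>
    simp [ht, hp, List.contains_eq_mem, List.mem_filter, hmem]

-- ===== VERDICT (by name: the statement is the Claim_ definition above) =====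
theorem get_true_positives_spec : Claim_equal_get_true_positives := by
  intro Y_true Y_pred _ hpre
  unfold Spec_get_true_positives get_true_positives get_true_positives_alt
  rw [if_neg (by simpa using hpre), if_neg (by simpa using hpre)]
  dsimp only
  rw [inter_ofList_filter_eq]
  rw [PySem.List.foldl_if_add_one]
  simp [List.countP_eq_length_filter]
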